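-- pv_equiv track=rewrite | github.com/Athena-Types/numerics-playground | benchmarks-new/large/matmul/generate_mat_mul.py | generate_nested_comment
-- ===== SOURCE A (Python) =====
-- def generate_nested_comment(elements):
--     """Generate nested tuple comment representation"""
--     if len(elements) == 1:
--         return elements[0]
--     elif len(elements) == 2:
--         return f"({elements[0]},{elements[1]})"
--     else:
--         result = elements[-1]
--         for i in range(len(elements) - 2, -1, -1):
--             result = f"({elements[i]},{result})"
--         return result
-- ===== SOURCE B (Python) =====
-- def generate_nested_comment(elements):
--     """Generate nested tuple comment representation (one-pass closed form)."""
--     if len(elements) == 1: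
--         return elements[0]
--     opens = "".join(f"({e}," for e in elements[:-1])
--     return opens + elements[-1] + ")" * (len(elements) - 1)
-- ===== Notes on version B (the rewrite author's own statement) =====
-- stated objective: faster
-- what changed: Replaces the reverse index loop that rebuilds the whole string each iteration with a one-pass closed form: join '(e,' prefixes over elements[:-1], append the last element, then append len-1 closing parens at once.
import Mathlib
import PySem

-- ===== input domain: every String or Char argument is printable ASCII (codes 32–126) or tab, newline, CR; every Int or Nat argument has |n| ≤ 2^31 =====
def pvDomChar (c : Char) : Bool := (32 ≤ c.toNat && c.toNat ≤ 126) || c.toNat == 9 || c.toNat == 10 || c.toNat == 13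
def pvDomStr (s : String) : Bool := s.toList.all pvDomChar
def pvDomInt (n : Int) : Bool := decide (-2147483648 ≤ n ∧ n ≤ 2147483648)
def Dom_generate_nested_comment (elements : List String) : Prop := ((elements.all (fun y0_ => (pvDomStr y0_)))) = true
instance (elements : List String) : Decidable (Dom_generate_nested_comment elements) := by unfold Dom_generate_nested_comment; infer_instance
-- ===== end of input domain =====

-- B replaces A's reverse index loop (which re-wraps the whole string each step) by a one-pass
-- closed form: join the "(e," prefixes, append the last element, append len-1 ")" at once.

-- ===== PORT A =====
def generate_nested_comment (elements : List String) : String :=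
  if elements.length = 1 then
    (PySem.List.pyGet? elements 0).getD ""
  else if elements.length = 2 then
    "(" ++ (PySem.List.pyGet? elements 0).getD "" ++ "," ++ (PySem.List.pyGet? elements 1).getD "" ++ ")"
  else
    (PySem.List.pyRange ((elements.length : Int) - 2) (-1) (-1)).foldl
      (fun result i => "(" ++ (PySem.List.pyGet? elements i).getD "" ++ "," ++ result ++ ")")
      ((PySem.List.pyGet? elements (-1)).getD "")

-- ===== PORT B =====
def generate_nested_comment_alt (elements : List String) : String :=
  if elements.length = 1 then
    (PySem.List.pyGet? elements 0).getD ""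
  else
    PySem.Str.join "" ((PySem.List.slice elements none (some (-1))).map (fun e => "(" ++ e ++ ","))
      ++ (PySem.List.pyGet? elements (-1)).getD ""
      -- ")" * (len(elements) - 1): Python string repetition ported by hand (exact): len-1 copies of ')'
      ++ String.ofList (List.replicate (elements.length - 1) ')')

-- ===== PRECONDITION & SPEC =====
-- Both A and B raise IndexError on the empty list; Pre_ excludes exactly that input.
def Pre_generate_nested_comment (elements : List String) : Prop := elements ≠ []
instance (elements : List String) : Decidable (Pre_generate_nested_comment elements) := by unfold Pre_generate_nested_comment; infer_instance
def pvWitness_generate_nested_comment : List String := (["a"])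
def Spec_generate_nested_comment (elements : List String) (out : String) : Prop := out = generate_nested_comment_alt elements
instance (elements : List String) (out : String) : Decidable (Spec_generate_nested_comment elements out) := by unfold Spec_generate_nested_comment; infer_instance

-- ===== CLAIM (what is proved, stated in full; the proofs are below) =====
def Claim_equal_generate_nested_comment : Prop := ∀ (elements : List String), Dom_generate_nested_comment elements → Pre_generate_nested_comment elements → Spec_generate_nested_comment elements (generate_nested_comment elements)

-- ===== LEMMAS AND PROOFS =====

-- the common recursive characterisation both ports are proved equal to
def pvRec : List String → String
  | [] => ""
  | [x] => x
  | x :: rest => "(" ++ x ++ "," ++ pvRec rest ++ ")"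

-- nested prefix wrapper over the first m indices of xs, peeling index 0 outermost
def pvNest (xs : List String) (m : Nat) (init : String) : String :=
  (List.range m).foldr
    (fun (k : Nat) acc => "(" ++ (PySem.List.pyGet? xs (k : Int)).getD "" ++ "," ++ acc ++ ")") init

lemma pvNest_cons (x : String) (rest : List String) (m : Nat) (init : String) :
    pvNest (x :: rest) (m + 1) init = "(" ++ x ++ "," ++ pvNest rest m init ++ ")" := by
  unfold pvNest
  simp only [List.range_succ_eq_map, List.foldr_cons, List.foldr_map, Nat.cast_zero,
    PySem.List.pyGet?_zero_cons, Option.getD_some]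
  have hfun : (fun (k : Nat) (y : String) =>
        "(" ++ (PySem.List.pyGet? (x :: rest) ((k.succ : Nat) : Int)).getD "" ++ "," ++ y ++ ")")
      = fun (k : Nat) acc => "(" ++ (PySem.List.pyGet? rest (k : Int)).getD "" ++ "," ++ acc ++ ")" := by
    funext k acc
    have hk : ((k.succ : Nat) : Int) = (k : Int) + 1 := by push_cast; ring
    rw [hk, PySem.List.pyGet?_cons_succ]
  rw [hfun]

lemma pvNest_rec (xs : List String) (hx : xs ≠ []) :
    pvRec xs = pvNest xs (xs.length - 1) ((PySem.List.pyGet? xs (-1)).getD "") := by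
  induction xs with
  | nil => exact absurd rfl hx
  | cons x rest ih =>
    cases rest with
    | nil => simp [pvRec, pvNest, PySem.List.pyGet?_neg_one]
    | cons y ys =>
      have hlen : (x :: y :: ys).length - 1 = (y :: ys).length - 1 + 1 := by
        simp
      rw [hlen, pvNest_cons]
      have hlast : (PySem.List.pyGet? (x :: y :: ys) (-1)).getD ""
          = (PySem.List.pyGet? (y :: ys) (-1)).getD "" := by
        simp [PySem.List.pyGet?_neg_one, List.getLast?_cons_cons]
      rw [hlast, ← ih (by simp)]
      simp [pvRec]

lemma pvLoop_eq_nest (xs : List String) (init : String) (h3 : 3 ≤ xs.length) :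
    (PySem.List.pyRange ((xs.length : Int) - 2) (-1) (-1)).foldl
      (fun result i => "(" ++ (PySem.List.pyGet? xs i).getD "" ++ "," ++ result ++ ")") init
    = pvNest xs (xs.length - 1) init := by
  rw [PySem.List.pyRange_neg_one_eq_reverse, List.foldl_reverse]
  have h1 : PySem.List.pyRange (-1 + 1) ((xs.length : Int) - 2 + 1) 1
      = (List.range (xs.length - 1)).map (fun (k : Nat) => (k : Int)) := by
    rw [PySem.List.pyRange_one]
    have : ((xs.length : Int) - 2 + 1 - (-1 + 1)).toNat = xs.length - 1 := by omega
    rw [this]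
    apply List.map_congr_left
    intro k _
    omega
  rw [h1, List.foldr_map]
  rfl

lemma pvA_eq_rec (xs : List String) (hx : xs ≠ []) : generate_nested_comment xs = pvRec xs := by
  unfold generate_nested_comment
  rcases xs with _ | ⟨x, _ | ⟨y, _ | ⟨z, t⟩⟩⟩
  · exact absurd rfl hx
  · simp [pvRec, PySem.List.pyGet?, PySem.List.pyIdx?]
  · simp [pvRec, PySem.List.pyGet?, PySem.List.pyIdx?]
  · have h3 : 3 ≤ (x :: y :: z :: t).length := by simp
    rw [if_neg (by simp), if_neg (by simp)]
    rw [pvLoop_eq_nest _ _ h3, ← pvNest_rec _ (by simp)]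

lemma pvJoin_empty_cons (p : String) (rest : List String) :
    PySem.Str.join "" (p :: rest) = p ++ PySem.Str.join "" rest := by
  cases rest with
  | nil =>
    apply String.toList_injective
    simp [PySem.Str.toList_join, PySem.Chars.join_singleton, PySem.Chars.join_nil]
  | cons q r =>
    apply String.toList_injective
    simp [PySem.Str.toList_join, PySem.Chars.join_cons_cons]

lemma pvMk_replicate_succ (k : Nat) :
    String.ofList (List.replicate (k + 1) ')') = String.ofList (List.replicate k ')') ++ ")" := by
  apply String.toList_injective
  simp [String.toList_ofList, List.replicate_succ']

lemma pvB_eq_rec (xs : List String) (hx : xs ≠ []) :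
    generate_nested_comment_alt xs = pvRec xs := by
  induction xs with
  | nil => exact absurd rfl hx
  | cons x rest ih =>
    cases rest with
    | nil => simp [generate_nested_comment_alt, pvRec, PySem.List.pyGet?, PySem.List.pyIdx?]
    | cons y ys =>
      unfold generate_nested_comment_alt
      rw [if_neg (by simp)]
      rw [PySem.List.slice_to_neg_one]
      have hdl : (x :: y :: ys).dropLast = x :: (y :: ys).dropLast := by
        simp
      rw [hdl, List.map_cons, pvJoin_empty_cons]
      have hlast : (PySem.List.pyGet? (x :: y :: ys) (-1)).getD ""
          = (PySem.List.pyGet? (y :: ys) (-1)).getD "" := by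
        simp [PySem.List.pyGet?_neg_one, List.getLast?_cons_cons]
      have hlen : (x :: y :: ys).length - 1 = ((y :: ys).length - 1) + 1 := by simp
      rw [hlast, hlen, pvMk_replicate_succ]
      have hrec : pvRec (x :: y :: ys) = "(" ++ x ++ "," ++ pvRec (y :: ys) ++ ")" := by
        simp [pvRec]
      rw [hrec, ← ih (by simp)]
      cases ys with
      | nil =>
        simp [generate_nested_comment_alt, PySem.List.pyGet?, PySem.List.pyIdx?]
        apply String.toList_injective
        simp [PySem.Str.toList_join, PySem.Chars.join_nil]
      | cons z u =>
        unfold generate_nested_comment_alt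
        rw [if_neg (by simp)]
        rw [PySem.List.slice_to_neg_one]
        simp only [String.append_assoc]

-- ===== VERDICT (by name: the statement is the Claim_ definition above) =====
theorem generate_nested_comment_spec : Claim_equal_generate_nested_comment := by
  intro elements _ hpre
  unfold Spec_generate_nested_comment
  rw [pvA_eq_rec elements hpre, pvB_eq_rec elements hpre]
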